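-- pv_equiv track=rewrite | github.com/yizhao-zhu-igt/PEKS-from-PSI-with-ProxyServer | 3_ClouldServer_Pre_Processing.py | construct_polynomial
-- ===== SOURCE A (Python) =====
-- def construct_polynomial(roots, q):
--     coeffs = [1]
--     for root in roots:
--         new_coeffs = [-root * c % q for c in coeffs] + [0]
--         for i in range(1, len(coeffs) + 1):
--             new_coeffs[i] = (new_coeffs[i] + coeffs[i - 1]) % q
--         coeffs = new_coeffs
--     return coeffs
-- ===== SOURCE B (Python) =====
-- def construct_polynomial(roots, q):
--     def mul(a, b):
--         return [sum(a[i] * b[k - i] for i in range(len(a)) if 0 <= k - i < len(b)) % q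
--                 for k in range(len(a) + len(b) - 1)]
--
--     def build(rs):
--         if not rs:
--             return [1]
--         if len(rs) == 1:
--             return [(-rs[0]) % q, 1 % q]
--         mid = len(rs) // 2
--         return mul(build(rs[:mid]), build(rs[mid:]))
--
--     return build(roots)
-- ===== Notes on version B (the rewrite author's own statement) =====
-- stated objective: alternative
-- what changed: A expands the product incrementally, multiplying the coefficient list by one (x - root) factor per loop iteration with an in-place index update; B builds the polynomial by divide-and-conquer over the roots, recursively constructing the two half-products and combining them with a mod-q schoolbook convolution.
import Mathlib
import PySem

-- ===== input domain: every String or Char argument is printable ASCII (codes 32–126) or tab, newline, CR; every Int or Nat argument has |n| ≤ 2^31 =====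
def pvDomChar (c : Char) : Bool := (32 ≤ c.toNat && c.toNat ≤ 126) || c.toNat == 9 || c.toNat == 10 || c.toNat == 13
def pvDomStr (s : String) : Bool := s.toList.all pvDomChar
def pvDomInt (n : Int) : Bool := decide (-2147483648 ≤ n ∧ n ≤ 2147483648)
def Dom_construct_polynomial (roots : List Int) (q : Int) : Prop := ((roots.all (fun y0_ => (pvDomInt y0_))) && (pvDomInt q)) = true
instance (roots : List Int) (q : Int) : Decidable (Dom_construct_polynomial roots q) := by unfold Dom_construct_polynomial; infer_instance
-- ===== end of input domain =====

-- B replaces A's incremental one-root-at-a-time expansion by a divide-and-conquer product of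
-- half-polynomials combined with a mod-q schoolbook convolution (alternative decomposition).

-- ===== PORT A =====
-- the body of A's outer loop: new_coeffs = [-root * c % q for c in coeffs] + [0];
-- then for i in range(1, len(coeffs)+1): new_coeffs[i] = (new_coeffs[i] + coeffs[i-1]) % q
-- (all indices are in range, so pyGetD/pySetD are exact)
def aStep (q : Int) (coeffs : List Int) (root : Int) : List Int :=
  let new0 := coeffs.map (fun c => PySem.Int.mod (-root * c) q) ++ [0]
  (PySem.List.pyRange 1 (PySem.List.len coeffs + 1) 1).foldl
    (fun nc i => PySem.List.pySetD nc i
      (PySem.Int.mod (PySem.List.pyGetD nc i 0 + PySem.List.pyGetD coeffs (i - 1) 0) q)) new0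

def construct_polynomial (roots : List Int) (q : Int) : List Int :=
  roots.foldl (aStep q) [1]

-- ===== PORT B =====
-- B's `mul`: schoolbook convolution, every entry reduced % q (guarded indices are in range)
def bMul (q : Int) (a b : List Int) : List Int :=
  (PySem.List.pyRange 0 (PySem.List.len a + PySem.List.len b - 1) 1).map (fun k =>
    PySem.Int.mod
      ((PySem.List.pyRange 0 (PySem.List.len a) 1).foldl (fun s i =>
        if 0 ≤ k - i ∧ k - i < PySem.List.len b then
          s + PySem.List.pyGetD a i 0 * PySem.List.pyGetD b (k - i) 0
        else s) 0) q)

-- B's `build`: rs[:mid] / rs[mid:] are take/drop (PySem.List.slice_natCast); mid = len(rs)//2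
def bBuild (q : Int) (rs : List Int) : List Int :=
  if h0 : rs = [] then [1]
  else if h1 : rs.length = 1 then [PySem.Int.mod (-(rs.headD 0)) q, PySem.Int.mod 1 q]
  else
    bMul q (bBuild q (rs.take (rs.length / 2))) (bBuild q (rs.drop (rs.length / 2)))
termination_by rs.length
decreasing_by
  · have := List.length_pos_iff.mpr h0
    simp only [List.length_take]; omega
  · have := List.length_pos_iff.mpr h0
    simp only [List.length_drop]; omega

def construct_polynomial_alt (roots : List Int) (q : Int) : List Int := bBuild q roots

-- ===== PRECONDITION & SPEC =====
-- Pre_ excludes exactly the inputs where the Python A raises ZeroDivisionError: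
-- q = 0 with a non-empty roots list (the first `% q` then divides by zero).
def Pre_construct_polynomial (roots : List Int) (q : Int) : Prop := roots = [] ∨ q ≠ 0
instance (roots : List Int) (q : Int) : Decidable (Pre_construct_polynomial roots q) := by
  unfold Pre_construct_polynomial; infer_instance

def pvWitness_construct_polynomial : List Int × Int := ([2, 3], 7)

def Spec_construct_polynomial (roots : List Int) (q : Int) (out : List Int) : Prop :=
  out = construct_polynomial_alt roots q
instance (roots : List Int) (q : Int) (out : List Int) :
    Decidable (Spec_construct_polynomial roots q out) := by
  unfold Spec_construct_polynomial; infer_instance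

-- ===== CLAIM (what is proved, stated in full; the proofs are below) =====
def Claim_equal_construct_polynomial : Prop :=
  ∀ (roots : List Int) (q : Int), Dom_construct_polynomial roots q →
    Pre_construct_polynomial roots q →
    Spec_construct_polynomial roots q (construct_polynomial roots q)

-- ===== LEMMAS AND PROOFS =====
-- Both sides are shown equal to `cfList q P n`: the first n coefficients (ascending degree)
-- of P = ∏ (X - root), each reduced with Python's `%` (= Int.fmod).

noncomputable def prodP (rs : List Int) : Polynomial ℤ :=
  (rs.map (fun r => Polynomial.X - Polynomial.C r)).prod

noncomputable def cfList (q : Int) (P : Polynomial ℤ) (n : Nat) : List Int :=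
  (List.range n).map (fun k => Int.fmod (P.coeff k) q)

-- `cs` represents P modulo q, out to every index (0 padding beyond cs.length)
def RepMod (q : Int) (cs : List Int) (P : Polynomial ℤ) : Prop :=
  ∀ k : Nat, q ∣ cs.getD k 0 - P.coeff k

-- congruent integers have equal Python remainders (any q, including q = 0)
theorem fmod_congr {q a b : Int} (h : q ∣ a - b) : Int.fmod a q = Int.fmod b q := by
  obtain ⟨k, hk⟩ := h
  have : a = b + q * k := by linarith
  rw [this, Int.add_mul_fmod_self_left]

theorem dvd_fmod_sub_self (q a : Int) : q ∣ Int.fmod a q - a := by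
  have := Int.fmod_add_mul_fdiv a q
  exact ⟨-(a.fdiv q), by linarith⟩

theorem coeff_XC_mul_zero (r : Int) (P : Polynomial ℤ) :
    ((Polynomial.X - Polynomial.C r) * P).coeff 0 = -r * P.coeff 0 := by
  rw [sub_mul, Polynomial.coeff_sub, Polynomial.coeff_C_mul]; simp

theorem coeff_XC_mul_succ (r : Int) (P : Polynomial ℤ) (k : Nat) :
    ((Polynomial.X - Polynomial.C r) * P).coeff (k + 1) = P.coeff k - r * P.coeff (k + 1) := by
  rw [sub_mul, Polynomial.coeff_sub, Polynomial.coeff_X_mul, Polynomial.coeff_C_mul]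

theorem prodP_natDegree_le (rs : List Int) : (prodP rs).natDegree ≤ rs.length := by
  refine le_trans (Polynomial.natDegree_list_prod_le _) ?_
  rw [List.map_map]
  refine le_trans (List.sum_le_card_nsmul _ 1 ?_) (by simp)
  intro x hx
  simp only [List.mem_map, Function.comp] at hx
  obtain ⟨r, _, rfl⟩ := hx
  exact le_of_eq (Polynomial.natDegree_X_sub_C r)

theorem prodP_coeff_eq_zero (rs : List Int) {k : Nat} (hk : rs.length + 1 ≤ k) :
    (prodP rs).coeff k = 0 :=
  Polynomial.coeff_eq_zero_of_natDegree_lt (lt_of_le_of_lt (prodP_natDegree_le rs) (by omega))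

theorem prodP_append (l r : List Int) : prodP (l ++ r) = prodP l * prodP r := by
  simp [prodP]

theorem cfList_length (q : Int) (P : Polynomial ℤ) (n : Nat) : (cfList q P n).length = n := by
  simp [cfList]

theorem cfList_getD (q : Int) (P : Polynomial ℤ) (n k : Nat) (hk : k < n) :
    (cfList q P n).getD k 0 = Int.fmod (P.coeff k) q := by
  simp [cfList, List.getD, List.getElem?_map, List.getElem?_range hk]

theorem RepMod_cfList (q : Int) (P : Polynomial ℤ) (n : Nat)
    (hdeg : ∀ k, n ≤ k → P.coeff k = 0) : RepMod q (cfList q P n) P := by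
  intro k
  by_cases hk : k < n
  · rw [cfList_getD q P n k hk]; exact dvd_fmod_sub_self q _
  · have h1 : (cfList q P n).getD k 0 = 0 := by
      apply List.getD_eq_default
      simp [cfList_length]; omega
    rw [h1, hdeg k (by omega)]; simp

-- A's loop body sends any representative of P to the reduced coefficients of (X - C r) * P

theorem take_set_succ (l : List Int) (j : Nat) (v : Int) (h : j < l.length) :
    (l.set j v).take (j + 1) = l.take j ++ [v] := by
  rw [List.set_eq_take_append_cons_drop, if_pos h, List.take_append]
  simp [List.length_take, Nat.min_eq_left (le_of_lt h)]

theorem getD_set_ne (l : List Int) (j i : Nat) (v : Int) (h : i ≠ j) :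
    (l.set j v).getD i 0 = l.getD i 0 := by
  simp only [List.getD, List.getElem?_set, if_neg (by omega : ¬ j = i)]

-- characterization of A's in-place index loop, peeled from position j onward
theorem aLoop (q : Int) (cs : List Int) :
    ∀ (d j : Nat) (l : List Int), 1 ≤ j → j + d = cs.length + 1 → l.length = cs.length + 1 →
      (PySem.List.pyRange (j : Int) ((cs.length : Int) + 1) 1).foldl
        (fun nc i => PySem.List.pySetD nc i
          (PySem.Int.mod (PySem.List.pyGetD nc i 0 + PySem.List.pyGetD cs (i - 1) 0) q)) l
      = l.take j ++ (List.range' j d).map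
          (fun i => Int.fmod (l.getD i 0 + cs.getD (i - 1) 0) q) := by
  intro d
  induction d with
  | zero =>
    intro j l hj hjd hl
    rw [PySem.List.pyRange_one_eq_nil (by omega)]
    simp [hl]
    omega
  | succ d ih =>
    intro j l hj hjd hl
    rw [PySem.List.pyRange_one_cons (by omega)]
    simp only [List.foldl_cons]
    have hcast : ((j : Int) - 1) = ((j - 1 : Nat) : Int) := by omega
    have hjl : j < l.length := by omega
    rw [PySem.List.pySetD_natCast, PySem.List.pyGetD_natCast, hcast, PySem.List.pyGetD_natCast]
    have hj1 : ((j : Int) + 1) = ((j + 1 : Nat) : Int) := by omega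
    rw [hj1, ih (j + 1) _ (by omega) (by omega) (by simp [hl])]
    simp only [PySem.Int.mod]
    set v := Int.fmod (l.getD j 0 + cs.getD (j - 1) 0) q with hv
    have h1 : (l.set j v).take (j + 1) = l.take j ++ [v] := take_set_succ l j v hjl
    have h2 : (List.range' (j + 1) d).map
        (fun i => Int.fmod ((l.set j v).getD i 0 + cs.getD (i - 1) 0) q)
        = (List.range' (j + 1) d).map
        (fun i => Int.fmod (l.getD i 0 + cs.getD (i - 1) 0) q) := by
      apply List.map_congr_left
      intro i hi
      rw [List.mem_range'] at hi
      rw [getD_set_ne l j i v (by omega)]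
    rw [h1, h2, List.range'_succ, List.map_cons]
    simp [hv]

theorem aStep_eq_cfList (q r : Int) (cs : List Int) (P : Polynomial ℤ) (n : Nat)
    (hlen : cs.length = n) (hn : 1 ≤ n) (hrep : RepMod q cs P) :
    aStep q cs r = cfList q ((Polynomial.X - Polynomial.C r) * P) (n + 1) := by
  subst hlen
  unfold aStep
  simp only [PySem.List.len_eq]
  have hstart := aLoop q cs (cs.length) 1
    (cs.map (fun c => PySem.Int.mod (-r * c) q) ++ [0]) le_rfl (by omega) (by simp)
  simp only [Nat.cast_one] at hstart
  rw [hstart]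
  have hnew : ∀ i : Nat, i ≤ cs.length →
      (cs.map (fun c => PySem.Int.mod (-r * c) q) ++ [0]).getD i 0
        = Int.fmod (-r * cs.getD i 0) q := by
    intro i hi
    rcases Nat.lt_or_ge i cs.length with h | h
    · rw [List.getD_append _ _ _ i (by simpa using h)]
      simp [List.getD, List.getElem?_map, List.getElem?_eq_getElem h, PySem.Int.mod]
    · have hi' : i = cs.length := by omega
      subst hi'
      rw [List.getD_append_right _ _ _ _ (by simp)]
      simp
  -- head
  obtain ⟨c0, cs', rfl⟩ : ∃ c0 cs', cs = c0 :: cs' := by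
    cases cs with
    | nil => simp at hn
    | cons a b => exact ⟨a, b, rfl⟩
  have hhead : ((c0 :: cs').map (fun c => PySem.Int.mod (-r * c) q) ++ [0]).take 1
      = [Int.fmod ((( Polynomial.X - Polynomial.C r) * P).coeff 0) q] := by
    simp only [List.map_cons, List.cons_append, List.take_succ_cons, List.take_zero]
    rw [coeff_XC_mul_zero, PySem.Int.mod]
    congr 1
    apply fmod_congr
    have h0 := hrep 0
    simp only [List.getD_cons_zero] at h0
    convert Dvd.dvd.mul_left h0 (-r) using 1
    ring
  rw [hhead]
  have hrhs : cfList q ((Polynomial.X - Polynomial.C r) * P) ((c0 :: cs').length + 1)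
      = Int.fmod (((Polynomial.X - Polynomial.C r) * P).coeff 0) q ::
        (List.range' 1 (c0 :: cs').length).map
          (fun k => Int.fmod (((Polynomial.X - Polynomial.C r) * P).coeff k) q) := by
    rw [cfList, List.range_eq_range', List.range'_succ, List.map_cons]
  rw [hrhs, List.singleton_append]
  congr 1
  apply List.map_congr_left
  intro i hi
  rw [List.mem_range'] at hi
  rw [hnew i (by omega)]
  obtain ⟨i', rfl⟩ : ∃ i', i = i' + 1 := ⟨i - 1, by omega⟩
  rw [coeff_XC_mul_succ]
  apply fmod_congr
  have h1 := hrep (i' + 1)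
  have h2 := hrep i'
  have hd := dvd_fmod_sub_self q (-r * (c0 :: cs').getD (i' + 1) 0)
  have : Int.fmod (-r * (c0 :: cs').getD (i' + 1) 0) q + (c0 :: cs').getD (i' + 1 - 1) 0
      - (P.coeff i' - r * P.coeff (i' + 1))
      = (Int.fmod (-r * (c0 :: cs').getD (i' + 1) 0) q - (-r * (c0 :: cs').getD (i' + 1) 0))
        + (-r) * ((c0 :: cs').getD (i' + 1) 0 - P.coeff (i' + 1))
        + ((c0 :: cs').getD i' 0 - P.coeff i') := by
    simp only [Nat.add_sub_cancel]
    ring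
  rw [this]
  exact dvd_add (dvd_add hd (Dvd.dvd.mul_left h1 (-r))) h2

-- B's `mul` on representatives of P and Q gives the reduced coefficients of P * Q
theorem bMul_eq_cfList (q : Int) (a b : List Int) (P Q : Polynomial ℤ) (m n : Nat)
    (ha : a.length = m + 1) (hb : b.length = n + 1)
    (hPd : ∀ k, m + 1 ≤ k → P.coeff k = 0) (hQd : ∀ k, n + 1 ≤ k → Q.coeff k = 0)
    (hra : RepMod q a P) (hrb : RepMod q b Q) :
    bMul q a b = cfList q (P * Q) (m + n + 1) := by
  unfold bMul cfList
  simp only [PySem.List.len_eq, ha, hb]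
  have hN : ((m + 1 : Nat) : Int) + ((n + 1 : Nat) : Int) - 1 = ((m + n + 1 : Nat) : Int) := by
    push_cast; ring
  rw [hN, PySem.List.pyRange_zero_natCast, PySem.List.pyRange_zero_natCast, List.map_map]
  apply List.map_congr_left
  intro k hk
  rw [List.mem_range] at hk
  simp only [Function.comp]
  rw [PySem.Int.mod, List.foldl_map]
  have hfun : (fun (s : Int) (i : Nat) =>
        if 0 ≤ (k : Int) - i ∧ (k : Int) - i < ((n + 1 : Nat) : Int) then
          s + PySem.List.pyGetD a i 0 * PySem.List.pyGetD b ((k : Int) - i) 0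
        else s)
      = fun (s : Int) (i : Nat) => s + (if 0 ≤ (k : Int) - i ∧ (k : Int) - i < ((n + 1 : Nat) : Int) then
          PySem.List.pyGetD a i 0 * PySem.List.pyGetD b ((k : Int) - i) 0 else 0) := by
    funext s i; split <;> simp
  rw [hfun, PySem.List.foldl_add, zero_add]
  apply fmod_congr
  set T : Nat → Int := fun i =>
    if 0 ≤ (k : Int) - i ∧ (k : Int) - i < ((n + 1 : Nat) : Int) then
      PySem.List.pyGetD a i 0 * PySem.List.pyGetD b ((k : Int) - i) 0 else 0 with hT
  set U : Nat → Int := fun i => if i ≤ k then P.coeff i * Q.coeff (k - i) else 0 with hU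
  have hsum1 : (List.map T (List.range (m + 1))).sum = ∑ i ∈ Finset.range (m + n + 2), T i := by
    show (∑ i ∈ Finset.range (m + 1), T i) = _
    apply Finset.sum_subset (by intro x hx; rw [Finset.mem_range] at *; omega : Finset.range (m + 1) ⊆ Finset.range (m + n + 2))
    intro i _ hi
    rw [Finset.mem_range, not_lt] at hi
    have hA0 : PySem.List.pyGetD a (i : Int) 0 = 0 := by
      rw [PySem.List.pyGetD_natCast]
      exact List.getD_eq_default _ _ (by omega)
    simp only [hT]
    split <;> simp [hA0]
  have hcoeff : (P * Q).coeff k = ∑ i ∈ Finset.range (m + n + 2), U i := by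
    rw [Polynomial.coeff_mul, Finset.Nat.sum_antidiagonal_eq_sum_range_succ_mk]
    have h1 : ∑ i ∈ Finset.range (m + n + 2), U i = ∑ i ∈ Finset.range (k + 1), U i := by
      refine (Finset.sum_subset
        (by intro x hx; rw [Finset.mem_range] at *; omega :
          Finset.range (k + 1) ⊆ Finset.range (m + n + 2)) ?_).symm
      intro i _ hi
      rw [Finset.mem_range, not_lt] at hi
      simp only [hU]
      exact if_neg (by omega)
    rw [h1]
    apply Finset.sum_congr rfl
    intro i hi
    rw [Finset.mem_range] at hi
    simp only [hU]
    exact (if_pos (by omega)).symm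
  rw [hsum1, hcoeff, ← Finset.sum_sub_distrib]
  apply Finset.dvd_sum
  intro i _
  simp only [hT, hU]
  by_cases hi1 : m + 1 ≤ i
  · have hA0 : PySem.List.pyGetD a (i : Int) 0 = 0 := by
      rw [PySem.List.pyGetD_natCast]
      exact List.getD_eq_default _ _ (by omega)
    have hP0 : P.coeff i = 0 := hPd i hi1
    split <;> split <;> simp [hA0, hP0]
  · by_cases hik : i ≤ k
    · by_cases hkin : k - i ≤ n
      · rw [if_pos (by constructor <;> omega), if_pos hik]
        have hcast : (k : Int) - i = ((k - i : Nat) : Int) := by omega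
        rw [PySem.List.pyGetD_natCast, hcast, PySem.List.pyGetD_natCast]
        have h1 := hra i
        have h2 := hrb (k - i)
        have heq : a.getD i 0 * b.getD (k - i) 0 - P.coeff i * Q.coeff (k - i)
            = a.getD i 0 * (b.getD (k - i) 0 - Q.coeff (k - i))
              + Q.coeff (k - i) * (a.getD i 0 - P.coeff i) := by ring
        rw [heq]
        exact dvd_add (Dvd.dvd.mul_left h2 _) (Dvd.dvd.mul_left h1 _)
      · rw [if_neg (by omega), if_pos hik, hQd (k - i) (by omega)]
        simp
    · rw [if_neg (by omega), if_neg hik]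
      simp

theorem bBuild_eq_cfList (q : Int) (rs : List Int) (hrs : rs ≠ []) :
    bBuild q rs = cfList q (prodP rs) (rs.length + 1) := by
  suffices h : ∀ (N : Nat) (rs : List Int), rs.length ≤ N → rs ≠ [] →
      bBuild q rs = cfList q (prodP rs) (rs.length + 1) from h rs.length rs le_rfl hrs
  intro N
  induction N with
  | zero =>
    intro rs h hne
    cases rs with
    | nil => cases hne rfl
    | cons a b => simp at h
  | succ N ih =>
    intro rs hlen hne
    by_cases h1 : rs.length = 1
    · obtain ⟨r, rfl⟩ : ∃ r, rs = [r] := by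
        cases rs with
        | nil => cases hne rfl
        | cons a t =>
          cases t with
          | nil => exact ⟨a, rfl⟩
          | cons b u => simp at h1
      rw [bBuild, dif_neg (by simp : ¬([r] : List Int) = []), dif_pos (by simp)]
      simp [cfList, prodP, List.range_succ, PySem.Int.mod, Polynomial.coeff_sub,
        Polynomial.coeff_X_zero, Polynomial.coeff_X_one]
      rw [show ((r : Polynomial ℤ)).coeff 1 = 0 from by
        rw [← Polynomial.C_eq_intCast, Polynomial.coeff_C]; simp]
      norm_num
    · have h2 : 2 ≤ rs.length := by
        have := List.length_pos_iff.mpr hne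
        omega
      rw [bBuild, dif_neg hne, dif_neg h1]
      set mid := rs.length / 2 with hmid
      have hmid1 : 1 ≤ mid := by omega
      have hmid2 : mid < rs.length := by omega
      have htk : (rs.take mid).length = mid := by simp; omega
      have hdp : (rs.drop mid).length = rs.length - mid := by simp
      have htne : rs.take mid ≠ [] := by
        intro h; rw [h] at htk; simp at htk; omega
      have hdne : rs.drop mid ≠ [] := by
        intro h; rw [h] at hdp; simp at hdp; omega
      rw [ih _ (by omega) htne, ih _ (by omega) hdne, htk, hdp]
      have hkey := bMul_eq_cfList q _ _ (prodP (rs.take mid)) (prodP (rs.drop mid))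
        mid (rs.length - mid)
        (by rw [cfList_length]) (by rw [cfList_length])
        (fun k hk => prodP_coeff_eq_zero _ (by rw [htk]; omega))
        (fun k hk => prodP_coeff_eq_zero _ (by rw [hdp]; omega))
        (RepMod_cfList _ _ _ (fun k hk => prodP_coeff_eq_zero _ (by rw [htk]; omega)))
        (RepMod_cfList _ _ _ (fun k hk => prodP_coeff_eq_zero _ (by rw [hdp]; omega)))
      rw [hkey, ← prodP_append, List.take_append_drop]
      congr 1
      omega

theorem foldl_aStep_eq_cfList (q : Int) (rs : List Int) (hrs : rs ≠ []) :
    ∀ (cs : List Int) (P : Polynomial ℤ) (n : Nat), cs.length = n → 1 ≤ n →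
      (∀ k, n ≤ k → P.coeff k = 0) → RepMod q cs P →
      rs.foldl (aStep q) cs = cfList q (P * prodP rs) (n + rs.length) := by
  revert hrs
  induction rs with
  | nil => intro h; cases h rfl
  | cons r rest ih =>
    intro _ cs P n hlen hn hdeg hrep
    rw [List.foldl_cons, aStep_eq_cfList q r cs P n hlen hn hrep]
    have hdeg' : ∀ k, n + 1 ≤ k → ((Polynomial.X - Polynomial.C r) * P).coeff k = 0 := by
      intro k hk
      obtain ⟨k', rfl⟩ : ∃ k', k = k' + 1 := ⟨k - 1, by omega⟩
      rw [coeff_XC_mul_succ, hdeg k' (by omega), hdeg (k' + 1) (by omega)]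
      ring
    cases rest with
    | nil =>
      simp only [List.foldl_nil]
      have hp : prodP [r] = Polynomial.X - Polynomial.C r := by simp [prodP]
      rw [hp, mul_comm]
      congr 1
    | cons r2 rest2 =>
      rw [ih (by simp) _ _ (n + 1) (cfList_length _ _ _) (by omega) hdeg'
        (RepMod_cfList _ _ _ hdeg')]
      have hp : (Polynomial.X - Polynomial.C r) * P * prodP (r2 :: rest2)
          = P * prodP (r :: r2 :: rest2) := by
        have h2 : prodP (r :: r2 :: rest2)
            = (Polynomial.X - Polynomial.C r) * prodP (r2 :: rest2) := by
          simp [prodP]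
        rw [h2]; ring
      rw [hp]
      congr 1
      simp only [List.length_cons]
      omega

-- ===== VERDICT (by name: the statement is the Claim_ definition above) =====
theorem construct_polynomial_spec : Claim_equal_construct_polynomial := by
  intro roots q _ _
  unfold Spec_construct_polynomial construct_polynomial construct_polynomial_alt
  cases roots with
  | nil => simp [bBuild]
  | cons r rest =>
    rw [bBuild_eq_cfList q (r :: rest) (by simp)]
    rw [foldl_aStep_eq_cfList q (r :: rest) (by simp) [1] 1 1 rfl le_rfl
      (fun k hk => by rw [Polynomial.coeff_one]; simp; omega)
      (fun k => by cases k <;> simp [Polynomial.coeff_one])]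
    rw [one_mul]
    congr 1
    simp; omega
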